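-- pv_equiv track=rewrite | github.com/HamzaBoukraa/AdventOfCode | 2024/python/AOC2024D15.py | is_box_move_possible_1
-- ===== SOURCE A (Python) =====
-- def is_box_move_possible_1(map_blocks, coordinates, direction_vertical, direction_horizontal):
--     if map_blocks[coordinates[0] + direction_vertical][coordinates[1] + direction_horizontal] == ".":
--         return True
--     elif map_blocks[coordinates[0] + direction_vertical][coordinates[1] + direction_horizontal] == "#":
--         return False
--     elif map_blocks[coordinates[0] + direction_vertical][coordinates[1] + direction_horizontal] == "O":
--         return is_box_move_possible_1(map_blocks, [coordinates[0] + direction_vertical,coordinates[1] + direction_horizontal], direction_vertical, direction_horizontal)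
--     return False
-- ===== SOURCE B (Python) =====
-- def is_box_move_possible_1(map_blocks, coordinates, direction_vertical, direction_horizontal):
--     r = coordinates[0] + direction_vertical
--     c = coordinates[1] + direction_horizontal
--     while map_blocks[r][c] == "O":
--         r += direction_vertical
--         c += direction_horizontal
--     return map_blocks[r][c] == "."
-- ===== Notes on version B (the rewrite author's own statement) =====
-- stated objective: simpler
-- what changed: Replaces the recursive three-branch if/elif chain (which rebuilds a coordinate list per step) with a plain while-loop over two local indices that skips 'O' cells and returns cell == '.', folding the '#'/other branches into one comparison.
import Mathlib
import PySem

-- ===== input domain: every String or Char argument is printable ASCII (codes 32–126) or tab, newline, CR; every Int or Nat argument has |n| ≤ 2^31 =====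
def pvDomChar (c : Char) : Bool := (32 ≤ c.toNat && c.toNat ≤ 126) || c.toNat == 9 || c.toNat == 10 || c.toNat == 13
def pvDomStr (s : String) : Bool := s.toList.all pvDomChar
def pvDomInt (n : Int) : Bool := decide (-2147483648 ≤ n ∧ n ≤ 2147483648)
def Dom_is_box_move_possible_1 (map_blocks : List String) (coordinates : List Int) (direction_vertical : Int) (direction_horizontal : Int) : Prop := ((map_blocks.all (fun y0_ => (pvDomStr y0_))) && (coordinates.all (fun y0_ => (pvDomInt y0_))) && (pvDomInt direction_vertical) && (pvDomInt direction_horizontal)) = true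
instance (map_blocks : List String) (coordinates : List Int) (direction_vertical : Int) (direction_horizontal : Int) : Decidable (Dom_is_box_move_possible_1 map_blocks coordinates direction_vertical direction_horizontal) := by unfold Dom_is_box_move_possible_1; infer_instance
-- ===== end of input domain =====

-- ===== PORT A =====
-- B changes: recursion + three-branch elif chain -> while-loop over two indices with one comparison (simpler).
-- A's cell read map_blocks[r][c] (Python indexing; none = IndexError)
def cellA (map_blocks : List String) (r c : Int) : Option Char :=
  match PySem.List.pyGet? map_blocks r with
  | none => none
  | some row => PySem.Str.pyGet? row c

-- A's recursion, on the coordinate pair (the recursive call's fresh 2-list [r', c']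
-- is carried as its two components); fuel makes the recursion total, it is never
-- exhausted on inputs satisfying Pre_.
def goA (map_blocks : List String) (dv dh : Int) : Nat → Int → Int → Bool
  | 0, _, _ => false
  | n+1, r, c =>
      if cellA map_blocks (r + dv) (c + dh) = some '.' then true
      else if cellA map_blocks (r + dv) (c + dh) = some '#' then false
      else if cellA map_blocks (r + dv) (c + dh) = some 'O' then
        goA map_blocks dv dh n (r + dv) (c + dh)
      else false

-- fuel: strictly more steps than any in-range chain of 'O' cells can have
def pvFuelA (map_blocks : List String) : Nat :=
  2 * (map_blocks.length + map_blocks.foldr (fun s m => max s.toList.length m) 0) + 3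

def is_box_move_possible_1 (map_blocks : List String) (coordinates : List Int) (direction_vertical : Int) (direction_horizontal : Int) : Bool :=
  match PySem.List.pyGet? coordinates 0, PySem.List.pyGet? coordinates 1 with
  | some r0, some c0 => goA map_blocks direction_vertical direction_horizontal (pvFuelA map_blocks) r0 c0
  | _, _ => false

-- ===== PORT B =====
-- B's cell read
def cellB (map_blocks : List String) (r c : Int) : Option Char :=
  (PySem.List.pyGet? map_blocks r).bind (fun row => PySem.Str.pyGet? row c)

-- B's fuel guard (same bound, stated independently of A's)
def pvFuelB (map_blocks : List String) : Nat :=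
  2 * (map_blocks.length + map_blocks.foldr (fun s m => max s.toList.length m) 0) + 3

-- the while-loop: skip 'O' cells, then answer cell == '.' (same fuel guard)
def loopB (map_blocks : List String) (dv dh : Int) : Nat → Int → Int → Bool
  | 0, _, _ => false
  | n+1, r, c =>
      if cellB map_blocks r c = some 'O' then loopB map_blocks dv dh n (r + dv) (c + dh)
      else decide (cellB map_blocks r c = some '.')

def is_box_move_possible_1_alt (map_blocks : List String) (coordinates : List Int) (direction_vertical : Int) (direction_horizontal : Int) : Bool :=
  match PySem.List.pyGet? coordinates 0 with
  | none => false
  | some r0 =>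
      match PySem.List.pyGet? coordinates 1 with
      | none => false
      | some c0 =>
          loopB map_blocks direction_vertical direction_horizontal (pvFuelB map_blocks)
            (r0 + direction_vertical) (c0 + direction_horizontal)

-- ===== PRECONDITION & SPEC =====
-- step bound used by Pre_ (stated independently of the ports' fuel)
def pvBound (map_blocks : List String) : Nat :=
  2 * (map_blocks.length + map_blocks.foldr (fun s m => max s.toList.length m) 0) + 3

-- cell at step k of the walk (none also when coordinates lacks an entry 0 or 1)
def pvStepCell (map_blocks : List String) (coordinates : List Int) (dv dh : Int) (k : Nat) : Option Char :=
  match PySem.List.pyGet? coordinates 0 with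
  | none => none
  | some r0 =>
      match PySem.List.pyGet? coordinates 1 with
      | none => none
      | some c0 =>
          (PySem.List.pyGet? map_blocks (r0 + (k : Int) * dv)).bind
            (fun row => PySem.Str.pyGet? row (c0 + (k : Int) * dh))

-- Pre_ = exactly the inputs where Python A returns: coordinates[0]/[1] exist and the
-- cell chain in the given direction reaches a non-'O' cell (at some step k, bounded by
-- pvFuel since in-range 'O' steps are confined to an interval of indices) with every
-- earlier cell an in-range 'O'; outside it A raises IndexError or recurses forever.
def Pre_is_box_move_possible_1 (map_blocks : List String) (coordinates : List Int) (direction_vertical : Int) (direction_horizontal : Int) : Prop :=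
  ∃ k ∈ Finset.Icc 1 (pvBound map_blocks),
    (∀ j ∈ Finset.Ico 1 k, pvStepCell map_blocks coordinates direction_vertical direction_horizontal j = some 'O') ∧
    pvStepCell map_blocks coordinates direction_vertical direction_horizontal k ≠ none ∧
    pvStepCell map_blocks coordinates direction_vertical direction_horizontal k ≠ some 'O'

instance (map_blocks : List String) (coordinates : List Int) (direction_vertical : Int) (direction_horizontal : Int) : Decidable (Pre_is_box_move_possible_1 map_blocks coordinates direction_vertical direction_horizontal) := by
  unfold Pre_is_box_move_possible_1; infer_instance

def pvWitness_is_box_move_possible_1 : List String × List Int × Int × Int :=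
  (["OO.#"], [0, 0], 0, 1)

def Spec_is_box_move_possible_1 (map_blocks : List String) (coordinates : List Int) (direction_vertical : Int) (direction_horizontal : Int) (out : Bool) : Prop := out = is_box_move_possible_1_alt map_blocks coordinates direction_vertical direction_horizontal
instance (map_blocks : List String) (coordinates : List Int) (direction_vertical : Int) (direction_horizontal : Int) (out : Bool) : Decidable (Spec_is_box_move_possible_1 map_blocks coordinates direction_vertical direction_horizontal out) := by unfold Spec_is_box_move_possible_1; infer_instance

-- ===== CLAIM (what is proved, stated in full; the proofs are below) =====
def Claim_equal_is_box_move_possible_1 : Prop := ∀ (map_blocks : List String) (coordinates : List Int) (direction_vertical : Int) (direction_horizontal : Int), Dom_is_box_move_possible_1 map_blocks coordinates direction_vertical direction_horizontal → Pre_is_box_move_possible_1 map_blocks coordinates direction_vertical direction_horizontal → Spec_is_box_move_possible_1 map_blocks coordinates direction_vertical direction_horizontal (is_box_move_possible_1 map_blocks coordinates direction_vertical direction_horizontal)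

-- ===== LEMMAS AND PROOFS =====
theorem pvFuelA_eq_pvFuelB (map_blocks : List String) :
    pvFuelA map_blocks = pvFuelB map_blocks := rfl

theorem cellA_eq_cellB (map_blocks : List String) (r c : Int) :
    cellA map_blocks r c = cellB map_blocks r c := by
  unfold cellA cellB
  cases PySem.List.pyGet? map_blocks r <;> rfl

theorem goA_eq_loopB (map_blocks : List String) (dv dh : Int) :
    ∀ (n : Nat) (r c : Int),
      goA map_blocks dv dh n r c = loopB map_blocks dv dh n (r + dv) (c + dh) := by
  intro n
  induction n with
  | zero => intro r c; rfl
  | succ n ih =>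
      intro r c
      rw [goA, loopB, cellA_eq_cellB]
      by_cases h1 : cellB map_blocks (r + dv) (c + dh) = some '.'
      · simp [h1]
      · by_cases h2 : cellB map_blocks (r + dv) (c + dh) = some '#'
        · simp [h2]
        · by_cases h3 : cellB map_blocks (r + dv) (c + dh) = some 'O'
          · simp [h3, ih]
          · simp [h1, h2, h3]

-- ===== VERDICT (by name: the statement is the Claim_ definition above) =====
theorem is_box_move_possible_1_spec : Claim_equal_is_box_move_possible_1 := by
  intro map_blocks coordinates dv dh _ _
  unfold Spec_is_box_move_possible_1 is_box_move_possible_1 is_box_move_possible_1_alt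
  cases PySem.List.pyGet? coordinates 0 <;> cases PySem.List.pyGet? coordinates 1 <;>
    simp [goA_eq_loopB, pvFuelA_eq_pvFuelB]
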